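-- pv_equiv track=rewrite | github.com/reginaib/Programming | Series_09/thankyouashandpikachu.py | longest_prefix
-- ===== SOURCE A (Python) =====
-- def normalize(t):
--     return ''.join(character for character in t.upper() if character.isalpha())
--
-- def longest_common_prefix(string, key):
--     n = 0
--     for n, (c1, c2) in enumerate(zip(string, key)):
--         if c1 != c2:
--             return n
--     return n + 1
--
-- def longest_prefix(t, d):
--     ln = 0
--     result = set()
--     n = normalize(t)
--     for k, v in d.items():
--         x = longest_common_prefix(n, v)
--         if x > ln:
--             result = {k}
--             ln = x
--         elif x == ln:
--             result.add(k)
--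
--     return result, ln
-- ===== SOURCE B (Python) =====
-- def normalize(t):
--     return ''.join(character for character in t.upper() if character.isalpha())
--
--
-- def longest_common_prefix(string, key):
--     n = 0
--     for n, (c1, c2) in enumerate(zip(string, key)):
--         if c1 != c2:
--             return n
--     return n + 1
--
--
-- def longest_prefix(t, d):
--     # Sort-then-scan: rank every entry by prefix length (stable, descending),
--     # then read off the leading block of maximal entries.
--     n = normalize(t)
--     scored = [(longest_common_prefix(n, v), k) for k, v in d.items()]
--     scored.sort(key=lambda p: p[0], reverse=True)
--     if not scored:
--         return set(), 0
--     ln = scored[0][0]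
--     result = set()
--     for x, k in scored:
--         if x != ln:
--             break
--         result.add(k)
--     return result, ln
-- ===== Notes on version B (the rewrite author's own statement) =====
-- stated objective: alternative
-- what changed: Replaces A's single-pass online argmax (running max with reset-on-new-max set mutation) by a sort-then-scan algorithm: score every entry, stable-sort the (score, key) pairs descending by score, and read off the leading block of maximal entries with an early break.
import Mathlib
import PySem

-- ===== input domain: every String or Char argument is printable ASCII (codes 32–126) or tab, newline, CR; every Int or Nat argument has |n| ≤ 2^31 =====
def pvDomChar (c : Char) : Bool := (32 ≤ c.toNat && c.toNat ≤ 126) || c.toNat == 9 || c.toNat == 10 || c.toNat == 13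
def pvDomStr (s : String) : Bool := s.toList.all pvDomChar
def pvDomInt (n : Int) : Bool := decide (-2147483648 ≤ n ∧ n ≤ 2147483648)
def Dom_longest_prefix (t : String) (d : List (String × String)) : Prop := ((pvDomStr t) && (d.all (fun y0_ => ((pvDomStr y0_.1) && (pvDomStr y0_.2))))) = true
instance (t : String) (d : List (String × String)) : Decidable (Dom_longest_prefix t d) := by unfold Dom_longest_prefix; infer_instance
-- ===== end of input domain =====

-- B replaces A's online argmax (running max, reset-on-new-max set) by sort-then-scan:
-- score every entry, stable-sort the (score, key) pairs descending by score, and read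
-- off the leading block of maximal entries (objective: alternative algorithm, same cost
-- up to the prelude's insertion sort).

-- shared helpers (identical in Source A and Source B): normalize and longest_common_prefix
def pvNormalize (t : String) : List Char :=
  (PySem.Chars.upper t.toList).filter PySem.Chars.isalpha

-- longest_common_prefix: `i` is the index of the current zip element; after a full
-- loop Python returns last-index+1 = i, except that on an empty zip it returns 0+1 = 1.
def pvLcpAux : List (Char × Char) → Int → Int
  | [], i => if i = 0 then 1 else i
  | (c1, c2) :: rest, i => if c1 ≠ c2 then i else pvLcpAux rest (i + 1)

def pvLcp (s : List Char) (k : String) : Int := pvLcpAux (s.zip k.toList) 0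

-- ===== PORT A =====
def longest_prefix (t : String) (d : List (String × String)) : List String × Int :=
  let n := pvNormalize t
  d.foldl (fun (acc : List String × Int) kv =>
      let x := pvLcp n kv.2
      if x > acc.2 then ([kv.1], x)
      else if x = acc.2 then (PySem.Set.add acc.1 kv.1, acc.2)
      else acc)
    (PySem.Set.empty, 0)

-- ===== PORT B =====
-- B's final loop: 'for x, k in scored: if x != ln: break; result.add(k)'
def pvCollect : List (Int × String) → Int → List String → List String
  | [], _, res => res
  | (x, k) :: rest, ln, res => if x ≠ ln then res else pvCollect rest ln (PySem.Set.add res k)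

def longest_prefix_alt (t : String) (d : List (String × String)) : List String × Int :=
  let n := pvNormalize t
  let scored := d.map (fun kv => (pvLcp n kv.2, kv.1))
  let sortedL := PySem.List.sorted scored (fun p => p.1) true
  match sortedL with
  | [] => (PySem.Set.empty, 0)
  | (x0, _) :: _ => (pvCollect sortedL x0 PySem.Set.empty, x0)

-- ===== PRECONDITION & SPEC =====
-- Pre_ excludes association lists with duplicate keys: they do not denote a Python
-- dict (the dict argument collapses them before either function runs), so the ports'
-- behaviour on them represents no Python input.
def Pre_longest_prefix (t : String) (d : List (String × String)) : Prop :=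
  (d.map Prod.fst).Nodup
instance (t : String) (d : List (String × String)) : Decidable (Pre_longest_prefix t d) := by
  unfold Pre_longest_prefix; infer_instance

def pvWitness_longest_prefix : String × (List (String × String)) :=
  ("ab", [("x", "AB"), ("y", "A")])

def Spec_longest_prefix (t : String) (d : List (String × String)) (out : List String × Int) : Prop := out = longest_prefix_alt t d
instance (t : String) (d : List (String × String)) (out : List String × Int) : Decidable (Spec_longest_prefix t d out) := by unfold Spec_longest_prefix; infer_instance

-- ===== CLAIM (what is proved, stated in full; the proofs are below) =====
def Claim_equal_longest_prefix : Prop := ∀ (t : String) (d : List (String × String)), Dom_longest_prefix t d → Pre_longest_prefix t d → Spec_longest_prefix t d (longest_prefix t d)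

-- ===== LEMMAS AND PROOFS =====

-- A's loop body, as a step over precomputed (key, prefix-length) pairs
def pvStep (acc : List String × Int) (p : String × Int) : List String × Int :=
  if p.2 > acc.2 then ([p.1], p.2)
  else if p.2 = acc.2 then (PySem.Set.add acc.1 p.1, acc.2)
  else acc

lemma pvLcpAux_nonneg (ps : List (Char × Char)) (i : Int) (h : 0 ≤ i) :
    0 ≤ pvLcpAux ps i := by
  induction ps generalizing i with
  | nil => simp only [pvLcpAux]; split <;> omega
  | cons p rest ih =>
    obtain ⟨c1, c2⟩ := p
    simp only [pvLcpAux]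
    split
    · exact h
    · exact ih (i + 1) (by omega)

lemma pvLcp_nonneg (s : List Char) (k : String) : 0 ≤ pvLcp s k :=
  pvLcpAux_nonneg _ _ le_rfl

-- invariant of A's loop: after processing `pre`, ln is the running max (from 0) and
-- the result set holds exactly the keys of `pre` attaining it, in order
lemma pvFoldA (xs : List (String × Int)) : ∀ (pre : List (String × Int)),
    ((pre ++ xs).map Prod.fst).Nodup →
    xs.foldl pvStep
        ((pre.filter (fun p => p.2 == (pre.map Prod.snd).foldl max 0)).map Prod.fst,
         (pre.map Prod.snd).foldl max 0)
      = (((pre ++ xs).filter (fun p => p.2 == ((pre ++ xs).map Prod.snd).foldl max 0)).map Prod.fst,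
         ((pre ++ xs).map Prod.snd).foldl max 0) := by
  induction xs with
  | nil => intro pre _; simp
  | cons p rest ih =>
    intro pre hnd
    obtain ⟨k, x⟩ := p
    have hle : ∀ q ∈ pre, q.2 ≤ (pre.map Prod.snd).foldl max 0 := by
      intro q hq
      exact (PySem.List.le_foldl_max (pre.map Prod.snd) 0).2 q.2 (List.mem_map_of_mem hq)
    have hassoc : pre ++ (k, x) :: rest = (pre ++ [(k, x)]) ++ rest := by simp
    have hstep : pvStep
        ((pre.filter (fun p => p.2 == (pre.map Prod.snd).foldl max 0)).map Prod.fst,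
         (pre.map Prod.snd).foldl max 0)
        (k, x)
        = (((pre ++ [(k, x)]).filter (fun p => p.2 == ((pre ++ [(k, x)]).map Prod.snd).foldl max 0)).map Prod.fst,
           ((pre ++ [(k, x)]).map Prod.snd).foldl max 0) := by
      by_cases hgt : x > (pre.map Prod.snd).foldl max 0
      · -- strictly larger prefix length: result set is reset to the new key
        simp [pvStep, hgt, List.filter_append, max_eq_right (le_of_lt hgt)]
        intro a b hab
        have := hle (a, b) hab
        omega
      · by_cases heq : x = (pre.map Prod.snd).foldl max 0
        · -- tie: the key is appended to the result set
          have hknotin : k ∉ (pre.filter (fun p => p.2 == (pre.map Prod.snd).foldl max 0)).map Prod.fst := by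
            intro hk
            have hk' : k ∈ pre.map Prod.fst := by
              rcases List.mem_map.mp hk with ⟨q, hq, hqk⟩
              exact List.mem_map.mpr ⟨q, List.mem_of_mem_filter hq, hqk⟩
            have hnd' : ((pre.map Prod.fst) ++ k :: rest.map Prod.fst).Nodup := by
              simpa using hnd
            rcases List.nodup_append.mp hnd' with ⟨_, _, hdisj⟩
            exact hdisj k hk' k (by simp) rfl
          have hadd : PySem.Set.add
              ((pre.filter (fun p => p.2 == (pre.map Prod.snd).foldl max 0)).map Prod.fst) k
              = (pre.filter (fun p => p.2 == (pre.map Prod.snd).foldl max 0)).map Prod.fst ++ [k] := by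
            simp [PySem.Set.add, hknotin]
          simp [pvStep, heq, List.filter_append, hadd]
        · -- strictly smaller: nothing changes
          simp [pvStep, hgt, heq, List.filter_append,
                max_eq_left (by omega : x ≤ (pre.map Prod.snd).foldl max 0)]
    calc ((k, x) :: rest).foldl pvStep _
        = rest.foldl pvStep (pvStep _ (k, x)) := by rw [List.foldl_cons]
      _ = (((pre ++ (k, x) :: rest).filter (fun p => p.2 == ((pre ++ (k, x) :: rest).map Prod.snd).foldl max 0)).map Prod.fst,
           ((pre ++ (k, x) :: rest).map Prod.snd).foldl max 0) := by
          rw [hstep, hassoc]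
          exact ih (pre ++ [(k, x)]) (by simpa using hnd)

-- insertion skips a leading block it does not go before
lemma pvInsertBy_append (before : Int × String → Int × String → Bool)
    (x : Int × String) (F R : List (Int × String))
    (h : ∀ y ∈ F, before x y = false) :
    PySem.List.insertBy before x (F ++ R) = F ++ PySem.List.insertBy before x R := by
  induction F with
  | nil => simp
  | cons f F ih =>
    simp only [List.cons_append, PySem.List.insertBy, h f (by simp)]
    rw [ih (fun y hy => h y (by simp [hy]))]
    simp

-- structure of the stable descending sort: the entries of maximal score form the
-- initial segment, in their original relative order; everything after scores lower
lemma pvSortedStruct (M : Int) (xs : List (Int × String))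
    (hub : ∀ p ∈ xs, p.1 ≤ M) :
    ∃ R, PySem.List.sorted xs (fun p => p.1) true
        = xs.filter (fun p => p.1 == M) ++ R ∧ ∀ p ∈ R, p.1 < M := by
  induction xs using List.reverseRecOn with
  | nil => exact ⟨[], by simp [PySem.List.sorted], by simp⟩
  | append_singleton xs x ih =>
    obtain ⟨R, hS, hR⟩ := ih (fun p hp => hub p (by simp [hp]))
    have hxM : x.1 ≤ M := hub x (by simp)
    have hF : ∀ y ∈ xs.filter (fun p => p.1 == M), (fun a b => decide (b.1 < a.1)) x y = false := by
      intro y hy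
      have : y.1 = M := by simpa using List.of_mem_filter hy
      simp [this]
      omega
    rw [PySem.List.sorted_rev_eq_foldl_insertBy] at hS ⊢
    rw [List.foldl_append, List.foldl_cons, List.foldl_nil, hS,
        pvInsertBy_append _ _ _ _ hF]
    by_cases hx : x.1 = M
    · -- x joins the maximal block, right after it
      have hins : PySem.List.insertBy (fun a b => decide (b.1 < a.1)) x R = x :: R := by
        cases R with
        | nil => rfl
        | cons r R' =>
          have : r.1 < x.1 := by have := hR r (by simp); omega
          simp [PySem.List.insertBy, this]
      refine ⟨R, ?_, hR⟩
      rw [hins]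
      simp [List.filter_append, hx]
    · -- x scores lower: it lands somewhere in the tail
      refine ⟨PySem.List.insertBy (fun a b => decide (b.1 < a.1)) x R, ?_, ?_⟩
      · simp [List.filter_append, hx]
      · intro p hp
        rcases (PySem.List.mem_insertBy _ _ _ _).mp hp with h | h
        · subst h; omega
        · exact hR p h

-- B's collection loop over (maximal block ++ lower tail) returns exactly the keys
-- of the maximal block, appended to the accumulator
lemma pvCollect_spec (M : Int) (F R : List (Int × String))
    (hF : ∀ p ∈ F, p.1 = M) (hR : ∀ p ∈ R, p.1 < M) :
    ∀ res, (res ++ F.map Prod.snd).Nodup →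
      pvCollect (F ++ R) M res = res ++ F.map Prod.snd := by
  induction F with
  | nil =>
    intro res _
    cases R with
    | nil => simp [pvCollect]
    | cons r R' =>
      obtain ⟨x, k⟩ := r
      have : x < M := hR (x, k) (by simp)
      simp only [List.nil_append, pvCollect]
      rw [if_pos (by omega)]
      simp
  | cons f F ih =>
    intro res hnd
    obtain ⟨x, k⟩ := f
    have hx : x = M := hF (x, k) (by simp)
    have hknot : k ∉ res := by
      intro hk
      rcases List.nodup_append.mp hnd with ⟨_, _, hdisj⟩
      exact hdisj k hk k (by simp) rfl
    have hadd : PySem.Set.add res k = res ++ [k] := by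
      simp [PySem.Set.add, hknot]
    simp only [List.cons_append, pvCollect, hx]
    rw [if_neg (by simp), hadd,
        ih (fun p hp => hF p (by simp [hp])) (res ++ [k]) (by simpa using hnd)]
    simp

-- ===== VERDICT (by name: the statement is the Claim_ definition above) =====
theorem longest_prefix_spec : Claim_equal_longest_prefix := by
  intro t d _ hpre
  unfold Spec_longest_prefix
  unfold Pre_longest_prefix at hpre
  cases d with
  | nil => rfl
  | cons kv0 dr =>
    set n := pvNormalize t with hn
    -- A's view: (key, score) pairs; M is the maximum score (scores are ≥ 0)
    set xs : List (String × Int) := (kv0 :: dr).map (fun kv => (kv.1, pvLcp n kv.2)) with hxs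
    set M : Int := (xs.map Prod.snd).foldl max 0 with hM
    have hkeys : xs.map Prod.fst = (kv0 :: dr).map Prod.fst := by
      simp [hxs, List.map_map, Function.comp]
    have hA : longest_prefix t (kv0 :: dr)
        = ((xs.filter (fun p => p.2 == M)).map Prod.fst, M) := by
      have h1 : longest_prefix t (kv0 :: dr) = xs.foldl pvStep ([], 0) := by
        simp only [longest_prefix, hxs, List.foldl_map]
        rfl
      rw [h1]
      have h2 := pvFoldA xs [] (by rw [List.nil_append, hkeys]; exact hpre)
      simpa using h2
    -- B's view: (score, key) pairs; same scores, same keys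
    set ys : List (Int × String) := (kv0 :: dr).map (fun kv => (pvLcp n kv.2, kv.1)) with hys
    have hub : ∀ p ∈ ys, p.1 ≤ M := by
      intro p hp
      rcases List.mem_map.mp hp with ⟨kv, hkv, rfl⟩
      exact (PySem.List.le_foldl_max (xs.map Prod.snd) 0).2 _
        (by exact List.mem_map.mpr ⟨(kv.1, pvLcp n kv.2),
              List.mem_map.mpr ⟨kv, hkv, rfl⟩, rfl⟩)
    -- M is attained: it is the running max of a nonempty list of nonnegative scores
    have hMmem : ∃ p ∈ ys, p.1 = M := by
      have hM' : M = (dr.map (fun kv => pvLcp n kv.2)).foldl max (pvLcp n kv0.2) := by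
        rw [hM, hxs]
        simp only [List.map_cons, List.map_map, List.foldl_cons]
        rw [max_eq_right (pvLcp_nonneg n kv0.2)]
        rfl
      rcases PySem.List.foldl_max_mem (dr.map (fun kv => pvLcp n kv.2)) (pvLcp n kv0.2) with h | h
      · refine ⟨(pvLcp n kv0.2, kv0.1), ?_, ?_⟩
        · exact List.mem_map.mpr ⟨kv0, by simp, rfl⟩
        · rw [hM']; exact h.symm
      · rcases List.mem_map.mp h with ⟨kv, hkv, hkveq⟩
        refine ⟨(pvLcp n kv.2, kv.1), ?_, ?_⟩
        · exact List.mem_map.mpr ⟨kv, List.mem_cons_of_mem _ hkv, rfl⟩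
        · rw [hM']; exact hkveq
    obtain ⟨R, hsorted, hRlt⟩ := pvSortedStruct M ys hub
    set F : List (Int × String) := ys.filter (fun p => p.1 == M) with hFdef
    have hFall : ∀ p ∈ F, p.1 = M := by
      intro p hp; simpa using List.of_mem_filter hp
    have hFne : F ≠ [] := by
      rcases hMmem with ⟨p, hp, hpM⟩
      intro hFnil
      have : p ∈ F := List.mem_filter.mpr ⟨hp, by simp [hpM]⟩
      simp [hFnil] at this
    -- the two filtered key lists coincide (both are keys of d filtered on score M)
    have hkeyeq : F.map Prod.snd = (xs.filter (fun p => p.2 == M)).map Prod.fst := by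
      rw [hFdef, hys, hxs, List.filter_map, List.filter_map, List.map_map, List.map_map]
      rfl
    have hnodupF : (F.map Prod.snd).Nodup := by
      rw [hkeyeq]
      refine List.Nodup.sublist (List.Sublist.map Prod.fst List.filter_sublist) ?_
      rw [hkeys]; exact hpre
    -- evaluate B
    obtain ⟨f0, F', hFcons⟩ := List.exists_cons_of_ne_nil hFne
    obtain ⟨x0, k0⟩ := f0
    have hx0 : x0 = M := hFall (x0, k0) (by simp [hFcons])
    subst hx0
    have hcollect := pvCollect_spec M F R hFall hRlt [] (by simpa using hnodupF)
    have hB : longest_prefix_alt t (kv0 :: dr) = (F.map Prod.snd, M) := by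
      simp only [longest_prefix_alt, ← hn, ← hys, hsorted, hFcons, List.cons_append]
      rw [hFcons] at hcollect
      simp only [List.cons_append, List.nil_append] at hcollect
      simp only [PySem.Set.empty]
      rw [hcollect]
    rw [hA, hB, hkeyeq]
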